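-- pv_equiv track=rewrite | github.com/leechehao/chehaonlp | umls_ner/data_utils.py | num_mod2sym
-- ===== SOURCE A (Python) =====
-- def num_mod2sym(residual, pair_sym, words):
--     result = []
--     sym_start = pair_sym[0]
--     for item in residual:
--         if ' '.join(words[item[0]:item[1]]) == 'change' or ' '.join(words[item[0]:item[1]]) == 'changes':
--             continue
--         if item[1] < sym_start and item[1] + 4 >= sym_start:
--             result.append(' '.join(words[item[0]:item[1]]))
--         if 'with' in set(words[i] for i in range(pair_sym[1], item[0])):
--             result.append(' '.join(words[item[0]:item[1]]))
--     return result
-- ===== SOURCE B (Python) =====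
-- def num_mod2sym(residual, pair_sym, words):
--     sym_start = pair_sym[0]
--     start = pair_sym[1]
--     # furthest span start we ever need to scan up to
--     m = start
--     for item in residual:
--         if item[0] > m:
--             m = item[0]
--     # first index >= start holding 'with' (None if absent): makes the
--     # per-item 'with'-scan an O(1) comparison
--     first_with = None
--     for j in range(start, m):
--         if words[j] == 'with':
--             first_with = j
--             break
--     result = []
--     for item in residual:
--         phrase = ' '.join(words[item[0]:item[1]])
--         if phrase == 'change' or phrase == 'changes':
--             continue
--         if item[1] < sym_start <= item[1] + 4:
--             result.append(phrase)
--         if first_with is not None and first_with < item[0]: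
--             result.append(phrase)
--     return result
-- ===== Notes on version B (the rewrite author's own statement) =====
-- stated objective: alternative
-- what changed: Precomputes the first 'with' index at or after pair_sym[1] once, turning A's per-item set-comprehension scan over words into an O(1) index comparison per item.
import Mathlib
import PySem

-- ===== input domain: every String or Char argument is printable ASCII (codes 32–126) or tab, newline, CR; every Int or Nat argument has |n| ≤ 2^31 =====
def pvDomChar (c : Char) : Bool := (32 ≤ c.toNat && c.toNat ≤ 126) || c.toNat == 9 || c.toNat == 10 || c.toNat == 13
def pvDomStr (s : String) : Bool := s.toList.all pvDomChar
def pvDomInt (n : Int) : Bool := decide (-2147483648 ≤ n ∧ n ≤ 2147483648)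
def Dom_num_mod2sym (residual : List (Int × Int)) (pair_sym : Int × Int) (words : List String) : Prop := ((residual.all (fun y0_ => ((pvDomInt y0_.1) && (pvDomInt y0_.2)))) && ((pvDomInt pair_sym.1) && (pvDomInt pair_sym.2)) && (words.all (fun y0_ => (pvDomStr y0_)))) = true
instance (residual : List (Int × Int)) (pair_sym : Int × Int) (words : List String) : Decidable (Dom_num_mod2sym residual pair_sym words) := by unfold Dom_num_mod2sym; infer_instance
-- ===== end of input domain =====

-- B replaces A's per-item set scan for 'with' by one precomputed first-'with' index (an O(1) comparison per item).

-- ===== PORT A =====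
def num_mod2sym (residual : List (Int × Int)) (pair_sym : Int × Int) (words : List String) : List String :=
  let sym_start := pair_sym.1
  residual.foldl (fun result item =>
    let phrase := PySem.Str.join " " (PySem.List.slice words (some item.1) (some item.2))
    if phrase = "change" ∨ phrase = "changes" then result
    else
      let result := if item.2 < sym_start ∧ item.2 + 4 ≥ sym_start then result ++ [phrase] else result
      if PySem.Set.contains
           (PySem.Set.ofList ((PySem.List.pyRange pair_sym.2 item.1 1).map
             (fun i => PySem.List.pyGet? words i)))
           (some "with")
      then result ++ [phrase] else result) []

-- ===== PORT B =====
def num_mod2sym_alt (residual : List (Int × Int)) (pair_sym : Int × Int) (words : List String) : List String :=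
  let sym_start := pair_sym.1
  let start := pair_sym.2
  let m := residual.foldl (fun m item => if item.1 > m then item.1 else m) start
  let first_with := (PySem.List.pyRange start m 1).find?
    (fun j => PySem.List.pyGet? words j == some "with")
  residual.foldl (fun result item =>
    let phrase := PySem.Str.join " " (PySem.List.slice words (some item.1) (some item.2))
    if phrase = "change" ∨ phrase = "changes" then result
    else
      let result := if item.2 < sym_start ∧ sym_start ≤ item.2 + 4 then result ++ [phrase] else result
      match first_with with
      | some j => if j < item.1 then result ++ [phrase] else result
      | none => result) []

-- ===== PRECONDITION & SPEC =====
-- Pre_ excludes exactly the inputs on which Python A raises IndexError: some item whose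
-- generator range(pair_sym[1], item[0]) is nonempty and reaches an index outside [-len(words), len(words)).
def Pre_num_mod2sym (residual : List (Int × Int)) (pair_sym : Int × Int) (words : List String) : Prop :=
  ∀ item ∈ residual, item.1 ≤ pair_sym.2 ∨
    (-(words.length : Int) ≤ pair_sym.2 ∧ item.1 ≤ (words.length : Int))
instance (residual : List (Int × Int)) (pair_sym : Int × Int) (words : List String) : Decidable (Pre_num_mod2sym residual pair_sym words) := by unfold Pre_num_mod2sym; infer_instance
def pvWitness_num_mod2sym : (List (Int × Int)) × (Int × Int) × List String :=
  ([(0, 2), (3, 4)], (3, 1), ["a", "with", "c", "d"])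
def Spec_num_mod2sym (residual : List (Int × Int)) (pair_sym : Int × Int) (words : List String) (out : List String) : Prop := out = num_mod2sym_alt residual pair_sym words
instance (residual : List (Int × Int)) (pair_sym : Int × Int) (words : List String) (out : List String) : Decidable (Spec_num_mod2sym residual pair_sym words out) := by unfold Spec_num_mod2sym; infer_instance

-- ===== CLAIM (what is proved, stated in full; the proofs are below) =====
def Claim_equal_num_mod2sym : Prop := ∀ (residual : List (Int × Int)) (pair_sym : Int × Int) (words : List String), Dom_num_mod2sym residual pair_sym words → Pre_num_mod2sym residual pair_sym words → Spec_num_mod2sym residual pair_sym words (num_mod2sym residual pair_sym words)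

-- ===== LEMMAS AND PROOFS =====

-- A's 'with' test for one item ('with' occurs among words[i], i in [p, a)) equals B's test
-- (the first match of the predicate on [p, m) exists and lies below a), whenever a ≤ m.
theorem with_scan_eq (words : List String) (p m a : Int) (ham : a ≤ m) :
    (some "with" ∈ (PySem.List.pyRange p a 1).map (fun i => PySem.List.pyGet? words i)) ↔
    (∃ j, (PySem.List.pyRange p m 1).find?
        (fun j => PySem.List.pyGet? words j == some "with") = some j ∧ j < a) := by
  constructor
  · intro hmem
    rcases List.mem_map.mp hmem with ⟨i, hi, hpi⟩
    have hpa : p ≤ a := by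
      rcases PySem.List.mem_pyRange_one.mp hi with ⟨h1, h2⟩; omega
    rw [PySem.List.pyRange_one_append p a m hpa ham, List.find?_append]
    have hsome : (List.find? (fun j => PySem.List.pyGet? words j == some "with")
        (PySem.List.pyRange p a 1)).isSome = true := by
      rw [List.find?_isSome]
      exact ⟨i, hi, by simp [hpi]⟩
    rcases Option.isSome_iff_exists.mp hsome with ⟨j, hj⟩
    refine ⟨j, by rw [hj]; rfl, ?_⟩
    have := List.mem_of_find?_eq_some hj
    exact (PySem.List.mem_pyRange_one.mp this).2
  · rintro ⟨j, hj, hja⟩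
    have hmem := List.mem_of_find?_eq_some hj
    have hpj := (PySem.List.mem_pyRange_one.mp hmem).1
    have hpred := List.find?_some hj
    have : PySem.List.pyGet? words j = some "with" := by simpa using hpred
    exact List.mem_map.mpr ⟨j, PySem.List.mem_pyRange_one.mpr ⟨hpj, hja⟩, this⟩

-- ===== VERDICT (by name: the statement is the Claim_ definition above) =====
theorem num_mod2sym_spec : Claim_equal_num_mod2sym := by
  intro residual pair_sym words _hdom _hpre
  unfold Spec_num_mod2sym num_mod2sym num_mod2sym_alt
  apply PySem.List.foldl_congr_mem
  intro acc item hitem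
  have hmax := (PySem.List.le_foldl_max (residual.map (·.1)) pair_sym.2).2 item.1
      (List.mem_map.mpr ⟨item, hitem, rfl⟩)
  have hfold : residual.foldl (fun m it => if it.1 > m then it.1 else m) pair_sym.2
      = (residual.map (·.1)).foldl max pair_sym.2 := by
    rw [List.foldl_map]
    apply PySem.List.foldl_congr_mem
    intro a x _
    rcases le_or_gt x.1 a with h | h
    · simp [max_eq_left h, if_neg (not_lt.mpr h)]
    · simp [max_eq_right (le_of_lt h), if_pos h]
  simp only [hfold]
  set m := (residual.map (·.1)).foldl max pair_sym.2 with hm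
  have hiff := with_scan_eq words pair_sym.2 m item.1 hmax
  rcases hfw : (PySem.List.pyRange pair_sym.2 m 1).find?
      (fun j => PySem.List.pyGet? words j == some "with") with _ | j
  · have hC : PySem.Set.contains
        (PySem.Set.ofList ((PySem.List.pyRange pair_sym.2 item.1 1).map
          (fun i => PySem.List.pyGet? words i))) (some "with") = false := by
      rw [Bool.eq_false_iff]
      intro h
      rcases hiff.mp ((PySem.Set.mem_ofList _ _).mp ((PySem.Set.contains_iff _ _).mp h)) with
        ⟨j, hj, _⟩
      rw [hfw] at hj; cases hj
    simp only [hC, Bool.false_eq_true, if_false]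
  · by_cases hja : j < item.1
    · have hC : PySem.Set.contains
          (PySem.Set.ofList ((PySem.List.pyRange pair_sym.2 item.1 1).map
            (fun i => PySem.List.pyGet? words i))) (some "with") = true :=
        (PySem.Set.contains_iff _ _).mpr ((PySem.Set.mem_ofList _ _).mpr
          (hiff.mpr ⟨j, hfw, hja⟩))
      simp only [hC, if_true, if_pos hja]
    · have hC : PySem.Set.contains
          (PySem.Set.ofList ((PySem.List.pyRange pair_sym.2 item.1 1).map
            (fun i => PySem.List.pyGet? words i))) (some "with") = false := by
        rw [Bool.eq_false_iff]
        intro h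
        rcases hiff.mp ((PySem.Set.mem_ofList _ _).mp ((PySem.Set.contains_iff _ _).mp h)) with
          ⟨j', hj', hj'a⟩
        rw [hfw] at hj'; cases hj'; exact hja hj'a
      simp only [hC, Bool.false_eq_true, if_false, if_neg hja]
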